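-- pv_equiv track=rewrite | github.com/craneofdust-web/vertex-ai-lm-poems | generate_skill_tree_visualizations.py | compute_depths
-- ===== SOURCE A (Python) =====
-- from typing import Any, Dict, List, Optional, Set
--
-- def compute_depths(prereq_map: Dict[str, List[str]]) -> Dict[str, int]:
--     memo: Dict[str, int] = {}
--
--     def dfs(node_id: str, stack: set[str]) -> int:
--         if node_id in memo:
--             return memo[node_id]
--         if node_id in stack:
--             return 0
--         prereq = prereq_map.get(node_id, [])
--         if not prereq:
--             memo[node_id] = 0
--             return 0
--         next_stack = set(stack)
--         next_stack.add(node_id)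
--         depth = 1 + max(dfs(parent_id, next_stack) for parent_id in prereq)
--         memo[node_id] = depth
--         return depth
--
--     for node_id in prereq_map:
--         dfs(node_id, set())
--     return memo
-- ===== SOURCE B (Python) =====
-- def compute_depths(prereq_map):
--     # Iterative DFS: an explicit frame stack replaces A's recursion (and A's
--     # per-level copy of the path set); each frame is [node, remaining_children, best].
--     memo = {}
--     for root in prereq_map:
--         if root in memo:
--             continue
--         prereq = prereq_map.get(root, [])
--         if not prereq:
--             memo[root] = 0
--             continue
--         on_path = {root}
--         frames = [[root, list(prereq), 0]]
--         while frames: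
--             frame = frames[-1]
--             node, children, best = frame
--             if children:
--                 p = children.pop(0)
--                 if p in memo:
--                     d = memo[p]
--                 elif p in on_path:
--                     d = 0
--                 else:
--                     child_prereq = prereq_map.get(p, [])
--                     if not child_prereq:
--                         memo[p] = 0
--                         d = 0
--                     else:
--                         on_path.add(p)
--                         frames.append([p, list(child_prereq), 0])
--                         continue
--                 if d > best:
--                     frame[2] = d
--             else:
--                 frames.pop()
--                 on_path.discard(node)
--                 depth = best + 1
--                 memo[node] = depth
--                 if frames:
--                     parent = frames[-1]
--                     if depth > parent[2]:
--                         parent[2] = depth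
--     return memo
-- ===== Notes on version B (the rewrite author's own statement) =====
-- stated objective: alternative
-- what changed: B replaces A's recursive DFS (which copies the whole path set at every level) with an iterative explicit frame-stack machine: a single while loop over [node, remaining-children, best] frames plus one shared on_path set, no recursion and no set copying.
import Mathlib
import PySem

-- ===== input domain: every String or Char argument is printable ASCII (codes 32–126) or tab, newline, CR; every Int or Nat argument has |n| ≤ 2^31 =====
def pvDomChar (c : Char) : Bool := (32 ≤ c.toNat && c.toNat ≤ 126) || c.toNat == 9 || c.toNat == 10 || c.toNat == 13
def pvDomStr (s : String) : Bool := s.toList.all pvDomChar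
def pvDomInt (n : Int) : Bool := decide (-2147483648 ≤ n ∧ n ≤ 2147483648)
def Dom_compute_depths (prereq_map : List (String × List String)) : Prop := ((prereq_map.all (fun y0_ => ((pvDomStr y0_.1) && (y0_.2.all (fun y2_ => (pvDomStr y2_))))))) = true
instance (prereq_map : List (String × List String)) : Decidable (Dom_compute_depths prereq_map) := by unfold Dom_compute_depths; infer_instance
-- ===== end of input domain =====

-- B replaces A's recursive DFS (which copies the whole path set at every level) with an iterative
-- explicit frame-stack machine: one while loop over [node, remaining-children, best] frames and a
-- single shared on_path set (objective: alternative).  Return-value equivalence; neither version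
-- mutates its argument.

-- Termination helpers (cited by the decreasing_by of both ports).
-- For port A: number of graph keys not yet on the path.
def pvKeysLeft (pm : List (String × List String)) (s : PySem.Set String) : Nat :=
  ((pm.map Prod.fst).filter (fun k => !(PySem.Set.contains s k))).length

-- For port B: number of graph keys neither memoised nor on the path.
def pvLeft (pm : List (String × List String)) (memo : PySem.Dict String Int)
    (s : PySem.Set String) : Nat :=
  ((pm.map Prod.fst).filter (fun k => !(memo.contains k) && !(PySem.Set.contains s k))).length

-- For port B: total size of the frame stack (one unit per frame plus its remaining children).
def pvFrames (frames : List (String × List String × Int)) : Nat :=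
  (frames.map (fun f => f.2.1.length + 1)).sum

theorem pvLookup_mem_keys {a : String} {l : List (String × List String)} {v : List String}
    (h : l.lookup a = some v) : a ∈ l.map Prod.fst := by
  induction l with
  | nil => simp [List.lookup] at h
  | cons e t ih =>
    rw [List.lookup] at h
    by_cases he : a == e.1
    · exact List.mem_map.2 ⟨e, List.mem_cons_self, (eq_of_beq he).symm⟩
    · simp [he] at h
      exact List.mem_map.2 (by
        rcases List.mem_map.1 (ih h) with ⟨x, hx, hfx⟩
        exact ⟨x, List.mem_cons_of_mem _ hx, hfx⟩)

-- generic: a pointwise-stronger filter predicate gives a shorter (≤) filtered list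
theorem pvFilterLe {α : Type} {p q : α → Bool} (h : ∀ a, q a = true → p a = true)
    (l : List α) : (l.filter q).length ≤ (l.filter p).length := by
  refine List.Sublist.length_le (List.monotone_filter_right _ ?_)
  intro a ha
  exact h a ha

-- generic: strictly shorter if some listed element satisfies p but not q
theorem pvFilterLt {α : Type} {p q : α → Bool} (h : ∀ a, q a = true → p a = true)
    {l : List α} {x : α} (hx : x ∈ l) (hpx : p x = true) (hqx : q x = false) :
    (l.filter q).length < (l.filter p).length := by
  induction l with
  | nil => cases hx
  | cons a t ih =>
    rcases List.mem_cons.1 hx with heq | hat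
    · subst heq
      simp only [List.filter_cons, hpx, hqx, if_true, List.length_cons]
      exact Nat.lt_succ_of_le (pvFilterLe h t)
    · have := ih hat
      simp only [List.filter_cons]
      split <;> split <;> simp_all <;> omega

theorem pvKeysLeft_add_lt (pm : List (String × List String)) (s : PySem.Set String) (x : String)
    (hx : PySem.Set.contains s x = false) (hk : x ∈ pm.map Prod.fst) :
    pvKeysLeft pm (PySem.Set.add s x) < pvKeysLeft pm s := by
  unfold pvKeysLeft
  refine pvFilterLt ?_ hk ?_ ?_
  · intro a ha
    simp only [Bool.not_eq_eq_eq_not, Bool.not_true, PySem.Set.contains_eq_listContains,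
      List.contains_eq_mem, decide_eq_false_iff_not] at *
    intro hmem
    exact ha (by simp [PySem.Set.mem_add, hmem])
  · simpa using hx
  · simp [PySem.Set.contains_eq_listContains, List.contains_eq_mem, PySem.Set.mem_add]

-- pvLeft is monotone under any growth of the memo (pointwise on contains)
theorem pvLeft_mono (pm : List (String × List String)) {m m' : PySem.Dict String Int}
    (s : PySem.Set String) (h : ∀ k, m.contains k = true → m'.contains k = true) :
    pvLeft pm m' s ≤ pvLeft pm m s := by
  unfold pvLeft
  refine pvFilterLe ?_ _
  intro a ha
  simp only [Bool.and_eq_true, Bool.not_eq_eq_eq_not, Bool.not_true] at *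
  refine ⟨?_, ha.2⟩
  cases hc : m.contains a with
  | false => rfl
  | true => rw [h a hc] at ha; exact ha.1

theorem pvLeft_insert_le (pm : List (String × List String)) (memo : PySem.Dict String Int)
    (s : PySem.Set String) (k : String) (v : Int) :
    pvLeft pm (memo.insert k v) s ≤ pvLeft pm memo s := by
  refine pvLeft_mono pm s ?_
  intro j hj
  rw [PySem.Dict.contains_insert]
  simp [hj]

theorem pvLeft_push_lt (pm : List (String × List String)) (memo : PySem.Dict String Int)
    (s : PySem.Set String) (p : String) (hm : memo.contains p = false)
    (hs : PySem.Set.contains s p = false) (hk : p ∈ pm.map Prod.fst) :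
    pvLeft pm memo (PySem.Set.add s p) < pvLeft pm memo s := by
  unfold pvLeft
  refine pvFilterLt ?_ hk ?_ ?_
  · intro a ha
    simp only [Bool.and_eq_true, Bool.not_eq_eq_eq_not, Bool.not_true] at *
    refine ⟨ha.1, ?_⟩
    have := ha.2
    simp only [PySem.Set.contains_eq_listContains, List.contains_eq_mem,
      decide_eq_false_iff_not] at *
    intro hmem
    exact this (by simp [PySem.Set.mem_add, hmem])
  · simp only [hm, Bool.not_false, Bool.true_and]
    simpa using hs
  · simp [PySem.Set.contains_eq_listContains, List.contains_eq_mem, PySem.Set.mem_add]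

-- pop: the node moves from the path into the memo; no key leaves the filter's complement
theorem pvLeft_pop_le (pm : List (String × List String)) (memo : PySem.Dict String Int)
    (s : PySem.Set String) (node : String) (v : Int) :
    pvLeft pm (memo.insert node v) (PySem.Set.discard s node) ≤ pvLeft pm memo s := by
  unfold pvLeft
  refine pvFilterLe ?_ _
  intro a ha
  simp only [Bool.and_eq_true, Bool.not_eq_eq_eq_not, Bool.not_true] at *
  obtain ⟨h1, h2⟩ := ha
  rw [PySem.Dict.contains_insert] at h1
  have hne : (a == node) = false := by
    cases h : (a == node) with
    | false => rfl
    | true => rw [h] at h1; simp at h1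
  simp only [hne, Bool.false_or] at h1
  refine ⟨h1, ?_⟩
  simp only [PySem.Set.contains_eq_listContains, List.contains_eq_mem,
    decide_eq_false_iff_not] at *
  intro hmem
  exact h2 (by
    rw [PySem.Set.mem_discard]
    exact ⟨hmem, by simpa using hne⟩)

mutual
-- ===== PORT A =====  (literal transliteration of Source A: dfs copies the stack at every level,
-- 'max(dfs(p, next_stack) for p in prereq)' becomes the recursion dfsAmax seeded by the first child)
def dfsA (pm : List (String × List String)) (node : String) (stack : PySem.Set String)
    (memo : PySem.Dict String Int) : Int × PySem.Dict String Int :=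
  match memo.get? node with
  | some v => (v, memo)
  | none =>
    if hs : PySem.Set.contains stack node then (0, memo)
    else
      match hpre : (pm.lookup node).getD [] with
      | [] => (0, memo.insert node 0)
      | p :: rest =>
        let next := PySem.Set.add stack node      -- next_stack = set(stack); next_stack.add(node_id)
        let r := dfsAmax pm p rest next memo
        (1 + r.1, r.2.insert node (1 + r.1))
termination_by (pvKeysLeft pm stack, 0, 0)
decreasing_by
  have hk : node ∈ pm.map Prod.fst := by
    cases hl : pm.lookup node with
    | none => rw [hl] at hpre; simp at hpre
    | some v => exact pvLookup_mem_keys hl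
  have := pvKeysLeft_add_lt pm stack node (by simpa using hs) hk
  exact Prod.Lex.left _ _ this

-- max over the nonempty generator (dfs(parent, next_stack) for parent in prereq)
def dfsAmax (pm : List (String × List String)) (p : String) (rest : List String)
    (stack : PySem.Set String) (memo : PySem.Dict String Int) : Int × PySem.Dict String Int :=
  let r := dfsA pm p stack memo
  match rest with
  | [] => r
  | q :: qs =>
    let r2 := dfsAmax pm q qs stack r.2
    (max r.1 r2.1, r2.2)
termination_by (pvKeysLeft pm stack, 1, rest.length)
decreasing_by
  · exact Prod.Lex.right _ (Prod.Lex.left _ _ (by omega))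
  · exact Prod.Lex.right _ (Prod.Lex.right _ (by simp))
end

def compute_depths (prereq_map : List (String × List String)) : List (String × Int) :=
  (prereq_map.foldl (fun memo entry => (dfsA prereq_map entry.1 PySem.Set.empty memo).2)
    PySem.Dict.empty).items

-- ===== PORT B =====  (transliteration of Source B's while loop: 'frames' is the explicit stack of
-- [node, remaining children, best] frames, 'onPath' the single shared path set; each equation is
-- one iteration of the loop)
def runB (pm : List (String × List String)) (frames : List (String × List String × Int))
    (onPath : PySem.Set String) (memo : PySem.Dict String Int) : PySem.Dict String Int :=
  match frames with
  | [] => memo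
  | (node, children, best) :: fs =>
    match children with
    | p :: rest =>                                        -- p = children.pop(0)
      match hg : memo.get? p with
      | some d =>                                         -- p in memo
        runB pm ((node, rest, if d > best then d else best) :: fs) onPath memo
      | none =>
        if hp : PySem.Set.contains onPath p then          -- p in on_path: d = 0
          runB pm ((node, rest, if (0 : Int) > best then 0 else best) :: fs) onPath memo
        else
          match hpre : (pm.lookup p).getD [] with
          | [] =>                                         -- no prerequisites: memo[p] = 0, d = 0
            runB pm ((node, rest, if (0 : Int) > best then 0 else best) :: fs) onPath
              (memo.insert p 0)
          | q :: qs =>                                    -- push a frame for p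
            runB pm ((p, q :: qs, 0) :: (node, rest, best) :: fs) (PySem.Set.add onPath p) memo
    | [] =>                                               -- frame finished: pop it
      let depth := best + 1
      let memo' := memo.insert node depth
      match fs with
      | [] => memo'                                       -- while loop ends
      | (pn, pc, pb) :: fs' =>                            -- propagate depth to the parent's best
        runB pm ((pn, pc, if depth > pb then depth else pb) :: fs') (PySem.Set.discard onPath node)
          memo'
termination_by (pvLeft pm memo onPath, pvFrames frames)
decreasing_by
  · exact Prod.Lex.right _ (by simp [pvFrames])
  · exact Prod.Lex.right _ (by simp [pvFrames])
  · have h1 := pvLeft_insert_le pm memo onPath p 0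
    rcases lt_or_eq_of_le h1 with h | h
    · exact Prod.Lex.left _ _ h
    · rw [h]
      exact Prod.Lex.right _ (by simp [pvFrames])
  · have hk : p ∈ pm.map Prod.fst := by
      cases hl : pm.lookup p with
      | none => rw [hl] at hpre; simp at hpre
      | some v => exact pvLookup_mem_keys hl
    have hm : memo.contains p = false := by
      rw [PySem.Dict.contains_eq_isSome_get?, hg]; rfl
    exact Prod.Lex.left _ _ (pvLeft_push_lt pm memo onPath p hm (by simpa using hp) hk)
  · have h1 := pvLeft_pop_le pm memo onPath node (best + 1)
    rcases lt_or_eq_of_le h1 with h | h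
    · exact Prod.Lex.left _ _ h
    · rw [h]
      exact Prod.Lex.right _ (by simp [pvFrames])

def compute_depths_alt (prereq_map : List (String × List String)) : List (String × Int) :=
  (prereq_map.foldl
    (fun memo entry =>
      if memo.contains entry.1 then memo
      else
        match (prereq_map.lookup entry.1).getD [] with
        | [] => memo.insert entry.1 0
        | p :: rest =>
          runB prereq_map [(entry.1, p :: rest, 0)] (PySem.Set.add PySem.Set.empty entry.1) memo)
    PySem.Dict.empty).items

-- ===== PRECONDITION & SPEC =====
def Spec_compute_depths (prereq_map : List (String × List String)) (out : List (String × Int)) : Prop := out = compute_depths_alt prereq_map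
instance (prereq_map : List (String × List String)) (out : List (String × Int)) : Decidable (Spec_compute_depths prereq_map out) := by unfold Spec_compute_depths; infer_instance

-- ===== CLAIM (what is proved, stated in full; the proofs are below) =====
def Claim_equal_compute_depths : Prop := ∀ (prereq_map : List (String × List String)), Dom_compute_depths prereq_map → Spec_compute_depths prereq_map (compute_depths prereq_map)

-- ===== LEMMAS AND PROOFS =====


-- Proof-layer middle form (the recursive single-path DFS): bridges runB to dfsA.
mutual
def visitB (pm : List (String × List String)) (node : String) (onPath : PySem.Set String)
    (memo : PySem.Dict String Int) : Int × PySem.Dict String Int :=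
  match hpre : (pm.lookup node).getD [] with
  | [] => (0, memo.insert node 0)
  | p :: rest =>
    let onPath1 := PySem.Set.add onPath node
    let r := visitLoop pm (p :: rest) onPath1 memo 0
    (r.1 + 1, r.2.insert node (r.1 + 1))
termination_by (3 * pvKeysLeft pm onPath + (if PySem.Set.contains onPath node then 2 else 0), 0)
decreasing_by
  have hk : node ∈ pm.map Prod.fst := by
    cases hl : pm.lookup node with
    | none => rw [hl] at hpre; simp at hpre
    | some v => exact pvLookup_mem_keys hl
  by_cases hc : PySem.Set.contains onPath node
  · have heq : PySem.Set.add onPath node = onPath := by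
      refine PySem.Set.add_of_mem ?_
      simpa [PySem.Set.contains_eq_listContains, List.contains_eq_mem] using hc
    apply Prod.Lex.left
    rw [heq, hc]
    simp
  · have := pvKeysLeft_add_lt pm onPath node (by simpa using hc) hk
    apply Prod.Lex.left
    simp only [hc]
    omega

def visitLoop (pm : List (String × List String)) (ps : List String) (onPath : PySem.Set String)
    (memo : PySem.Dict String Int) (best : Int) : Int × PySem.Dict String Int :=
  match ps with
  | [] => (best, memo)
  | p :: rest =>
    match memo.get? p with
    | some d => visitLoop pm rest onPath memo (if d > best then d else best)
    | none =>
      if hp : PySem.Set.contains onPath p then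
        visitLoop pm rest onPath memo (if (0 : Int) > best then 0 else best)
      else
        let r := visitB pm p onPath memo
        visitLoop pm rest onPath r.2 (if r.1 > best then r.1 else best)
termination_by (3 * pvKeysLeft pm onPath + 1, ps.length)
decreasing_by
  · exact Prod.Lex.right _ (by simp)
  · exact Prod.Lex.right _ (by simp)
  · apply Prod.Lex.left
    simp only [hp]
    simp only [Bool.false_eq_true, if_false]
    omega
  · exact Prod.Lex.right _ (by simp)
end

-- memo only grows through visitB / visitLoop (needed for runB_eq's termination argument)
mutual
theorem visitB_mono (pm : List (String × List String)) (node : String)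
    (onPath : PySem.Set String) (memo : PySem.Dict String Int) :
    ∀ k, memo.contains k = true → ((visitB pm node onPath memo).2).contains k = true := by
  intro k hk
  rw [visitB.eq_def]
  cases hpre : (pm.lookup node).getD [] with
  | nil =>
    simp only
    rw [PySem.Dict.contains_insert, hk]
    simp
  | cons p rest =>
    simp only
    rw [PySem.Dict.contains_insert,
      visitLoop_mono pm (p :: rest) (PySem.Set.add onPath node) memo 0 k hk]
    simp
termination_by (3 * pvKeysLeft pm onPath + (if PySem.Set.contains onPath node then 2 else 0), 0)
decreasing_by
  have hkm : node ∈ pm.map Prod.fst := by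
    cases hl : pm.lookup node with
    | none => rw [hl] at hpre; simp at hpre
    | some v => exact pvLookup_mem_keys hl
  by_cases hc : PySem.Set.contains onPath node
  · have heq : PySem.Set.add onPath node = onPath := by
      refine PySem.Set.add_of_mem ?_
      simpa [PySem.Set.contains_eq_listContains, List.contains_eq_mem] using hc
    apply Prod.Lex.left
    rw [heq, hc]
    simp
  · have := pvKeysLeft_add_lt pm onPath node (by simpa using hc) hkm
    apply Prod.Lex.left
    simp only [hc]
    omega

theorem visitLoop_mono (pm : List (String × List String)) (ps : List String)
    (onPath : PySem.Set String) (memo : PySem.Dict String Int) (best : Int) :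
    ∀ k, memo.contains k = true → ((visitLoop pm ps onPath memo best).2).contains k = true := by
  intro k hk
  rw [visitLoop.eq_def]
  cases ps with
  | nil => exact hk
  | cons p rest =>
    simp only
    cases hg : memo.get? p with
    | some d => exact visitLoop_mono pm rest onPath memo _ k hk
    | none =>
      by_cases hp : PySem.Set.contains onPath p
      · rw [dif_pos hp]
        exact visitLoop_mono pm rest onPath memo _ k hk
      · rw [dif_neg hp]
        exact visitLoop_mono pm rest onPath _ _ k (visitB_mono pm p onPath memo k hk)
termination_by (3 * pvKeysLeft pm onPath + 1, ps.length)
decreasing_by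
  all_goals first
    | exact Prod.Lex.right _ (by simp)
    | (apply Prod.Lex.left; rw [if_neg hp]; omega)
end

-- lex-measure helper: first component ≤ and second component < give Prod.Lex <
theorem pvLexStep {a a' b b' : Nat} (h1 : a' ≤ a) (h2 : b' < b) :
    Prod.Lex (· < ·) (· < ·) (a', b') (a, b) := by
  rcases lt_or_eq_of_le h1 with h | h
  · exact Prod.Lex.left _ _ h
  · rw [h]
    exact Prod.Lex.right _ h2

-- pvLeft only shrinks when a visitLoop result (plus one insert) replaces the memo
theorem pvLeft_visit_insert_le (pm : List (String × List String)) (l : List String)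
    (s path : PySem.Set String) (m : PySem.Dict String Int) (b : Int) (k : String) (v : Int) :
    pvLeft pm ((visitLoop pm l s m b).2.insert k v) path ≤ pvLeft pm m path := by
  refine pvLeft_mono pm path ?_
  intro j hj
  rw [PySem.Dict.contains_insert, visitLoop_mono pm l s m b j hj]
  simp

-- the pop continuation of runB, factored out for the statement of runB_eq
def runBpop (pm : List (String × List String)) (fs : List (String × List String × Int))
    (onPath : PySem.Set String) (memo : PySem.Dict String Int) (depth : Int) :
    PySem.Dict String Int :=
  match fs with
  | [] => memo
  | (pn, pc, pb) :: fs' =>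
    runB pm ((pn, pc, if depth > pb then depth else pb) :: fs') onPath memo

theorem discard_add_self (s : PySem.Set String) (x : String)
    (hx : PySem.Set.contains s x = false) :
    PySem.Set.discard (PySem.Set.add s x) x = s := by
  have hx' : x ∉ s := by simpa using hx
  rw [PySem.Set.add_of_not_mem hx']
  simp [PySem.Set.discard]
  intro a ha h
  subst h
  exact hx' ha

-- the key lemma: one frame of the machine computes exactly visitLoop, then pops
theorem runB_eq (pm : List (String × List String)) (node : String) (ps : List String)
    (best : Int) (fs : List (String × List String × Int)) (onPath : PySem.Set String)
    (memo : PySem.Dict String Int) :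
    runB pm ((node, ps, best) :: fs) onPath memo =
      runBpop pm fs (PySem.Set.discard onPath node)
        ((visitLoop pm ps onPath memo best).2.insert node
          ((visitLoop pm ps onPath memo best).1 + 1))
        ((visitLoop pm ps onPath memo best).1 + 1) := by
  cases ps with
  | nil =>
    rw [runB.eq_def, visitLoop.eq_def]
    cases fs with
    | nil => rfl
    | cons f fs' =>
      obtain ⟨pn, pc, pb⟩ := f
      rfl
  | cons p rest =>
    have hred : runB pm ((node, p :: rest, best) :: fs) onPath memo =
        match hg : memo.get? p with
        | some d => runB pm ((node, rest, if d > best then d else best) :: fs) onPath memo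
        | none =>
          if hp : PySem.Set.contains onPath p then
            runB pm ((node, rest, if (0 : Int) > best then 0 else best) :: fs) onPath memo
          else
            match hpre : (pm.lookup p).getD [] with
            | [] =>
              runB pm ((node, rest, if (0 : Int) > best then 0 else best) :: fs) onPath
                (memo.insert p 0)
            | q :: qs =>
              runB pm ((p, q :: qs, 0) :: (node, rest, best) :: fs) (PySem.Set.add onPath p)
                memo := by
      rw [runB.eq_def]
    rw [hred]
    split
    · rename_i d hg
      conv_rhs => rw [visitLoop.eq_def]
      simp only [hg]
      rw [runB_eq pm node rest (if d > best then d else best) fs onPath memo]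
    · rename_i hg
      split
      · rename_i hp
        conv_rhs => rw [visitLoop.eq_def]
        simp only [hg]
        rw [dif_pos hp]
        rw [runB_eq pm node rest (if (0 : Int) > best then 0 else best) fs onPath memo]
      · rename_i hp
        split
        · rename_i hpre
          have hv : visitB pm p onPath memo = (0, memo.insert p 0) := by
            rw [visitB.eq_def]
            split
            · rfl
            · rename_i q qs hpre2
              rw [hpre] at hpre2
              cases hpre2
          conv_rhs => rw [visitLoop.eq_def]
          simp only [hg]
          rw [dif_neg hp]
          simp only [hv]
          rw [runB_eq pm node rest (if (0 : Int) > best then 0 else best) fs onPath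
            (memo.insert p 0)]
        · rename_i q qs hpre
          have hv : visitB pm p onPath memo =
              ((visitLoop pm (q :: qs) (PySem.Set.add onPath p) memo 0).1 + 1,
               (visitLoop pm (q :: qs) (PySem.Set.add onPath p) memo 0).2.insert p
                 ((visitLoop pm (q :: qs) (PySem.Set.add onPath p) memo 0).1 + 1)) := by
            rw [visitB.eq_def]
            split
            · rename_i hpre2
              rw [hpre] at hpre2
              cases hpre2
            · rename_i q' qs' hpre2
              rw [hpre] at hpre2
              injection hpre2 with h1 h2
              subst h1
              subst h2
              rfl
          have hlt : pvLeft pm memo (PySem.Set.add onPath p) < pvLeft pm memo onPath := by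
            have hk : p ∈ pm.map Prod.fst := by
              cases hl : pm.lookup p with
              | none => rw [hl] at hpre; simp at hpre
              | some v => exact pvLookup_mem_keys hl
            have hm : memo.contains p = false := by
              rw [PySem.Dict.contains_eq_isSome_get?, hg]; rfl
            exact pvLeft_push_lt pm memo onPath p hm (by simpa using hp) hk
          conv_rhs => rw [visitLoop.eq_def]
          simp only [hg]
          rw [dif_neg hp]
          simp only [hv]
          rw [runB_eq pm p (q :: qs) 0 ((node, rest, best) :: fs) (PySem.Set.add onPath p) memo]
          conv_lhs => simp only [runBpop]
          rw [discard_add_self onPath p (by simpa using hp)]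
          rw [runB_eq pm node rest _ fs onPath _]
termination_by (pvLeft pm memo onPath, pvFrames ((node, ps, best) :: fs))
decreasing_by
  all_goals first
    | exact Prod.Lex.right _ (by simp [pvFrames])
    | exact pvLexStep (pvLeft_insert_le pm memo onPath _ 0) (by simp [pvFrames])
    | exact Prod.Lex.left _ _ hlt
    | exact pvLexStep (pvLeft_visit_insert_le pm _ _ onPath memo _ _ _) (by simp [pvFrames])

-- every value stored in the memo is nonnegative
def pvInv (memo : PySem.Dict String Int) : Prop := ∀ v ∈ memo.values, 0 ≤ v

theorem pvInv_insert {memo : PySem.Dict String Int} (h : pvInv memo) {k : String} {v : Int}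
    (hv : 0 ≤ v) : pvInv (memo.insert k v) := by
  intro w hw
  rcases PySem.Dict.mem_values_insert memo k v w hw with rfl | hw'
  · exact hv
  · exact h w hw'

theorem pvInv_get? {memo : PySem.Dict String Int} (h : pvInv memo) {k : String} {v : Int}
    (hv : memo.get? k = some v) : 0 ≤ v := by
  refine h v ?_
  have := PySem.Dict.mem_items_of_get?_eq_some memo hv
  exact List.mem_map.2 ⟨(k, v), this, rfl⟩

theorem pvMax_ite (a b : Int) : (if b > a then b else a) = max a b := by
  rw [max_def]; split <;> split <;> omega

mutual
theorem dfsA_eq_visitB (pm : List (String × List String)) (node : String)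
    (S : PySem.Set String) (memo : PySem.Dict String Int) (hinv : pvInv memo) :
    (dfsA pm node S memo =
      match memo.get? node with
      | some v => (v, memo)
      | none => if PySem.Set.contains S node then (0, memo) else visitB pm node S memo)
    ∧ 0 ≤ (dfsA pm node S memo).1 ∧ pvInv (dfsA pm node S memo).2 := by
  rw [dfsA.eq_def]
  cases hg : memo.get? node with
  | some v =>
    simp only [hg]
    exact ⟨trivial, pvInv_get? hinv hg, hinv⟩
  | none =>
    simp only [hg]
    by_cases hs : PySem.Set.contains S node
    · rw [dif_pos hs, if_pos hs]
      exact ⟨rfl, le_refl 0, hinv⟩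
    · rw [dif_neg hs, if_neg hs, visitB.eq_def]
      cases hpre : (pm.lookup node).getD [] with
      | nil =>
        simp only [hpre]
        exact ⟨trivial, le_refl 0, pvInv_insert hinv (le_refl 0)⟩
      | cons p rest =>
        simp only [hpre]
        obtain ⟨heq, h0, hinv1⟩ :=
          dfsAmax_eq_visitLoop pm p rest (PySem.Set.add S node) memo 0 hinv (le_refl 0)
        have hm : max 0 (dfsAmax pm p rest (PySem.Set.add S node) memo).1 =
            (dfsAmax pm p rest (PySem.Set.add S node) memo).1 := max_eq_right h0
        refine ⟨?_, by simpa using by omega, pvInv_insert hinv1 (by omega)⟩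
        rw [heq, hm, Int.add_comm 1 (dfsAmax pm p rest (PySem.Set.add S node) memo).1]
termination_by (pvKeysLeft pm S, 0, 0)
decreasing_by
  have hk : node ∈ pm.map Prod.fst := by
    cases hl : pm.lookup node with
    | none => rw [hl] at hpre; simp at hpre
    | some v => exact pvLookup_mem_keys hl
  have := pvKeysLeft_add_lt pm S node (by simpa using hs) hk
  exact Prod.Lex.left _ _ this

theorem dfsAmax_eq_visitLoop (pm : List (String × List String)) (p : String) (rest : List String)
    (S : PySem.Set String) (memo : PySem.Dict String Int) (best : Int) (hinv : pvInv memo)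
    (hbest : 0 ≤ best) :
    (visitLoop pm (p :: rest) S memo best =
      (max best (dfsAmax pm p rest S memo).1, (dfsAmax pm p rest S memo).2))
    ∧ 0 ≤ (dfsAmax pm p rest S memo).1 ∧ pvInv (dfsAmax pm p rest S memo).2 := by
  obtain ⟨heqA, h0, hinv1⟩ := dfsA_eq_visitB pm p S memo hinv
  have step1 : visitLoop pm (p :: rest) S memo best =
      visitLoop pm rest S (dfsA pm p S memo).2 (max best (dfsA pm p S memo).1) := by
    rw [visitLoop.eq_def]
    cases hg : memo.get? p with
    | some d =>
      have hthis : dfsA pm p S memo = (d, memo) := by rw [heqA, hg]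
      simp only [hg, hthis, pvMax_ite]
    | none =>
      by_cases hp : PySem.Set.contains S p
      · have hthis : dfsA pm p S memo = (0, memo) := by rw [heqA, hg]; exact if_pos hp
        simp only [hg]
        rw [dif_pos hp]
        simp only [hthis, pvMax_ite]
      · have hthis : dfsA pm p S memo = visitB pm p S memo := by rw [heqA, hg]; exact if_neg hp
        simp only [hg]
        rw [dif_neg hp]
        simp only [hthis, pvMax_ite]
  cases rest with
  | nil =>
    rw [dfsAmax.eq_def]
    simp only
    rw [step1, visitLoop.eq_def]
    exact ⟨rfl, h0, hinv1⟩
  | cons q qs =>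
    obtain ⟨ih1, ih0, ihinv⟩ :=
      dfsAmax_eq_visitLoop pm q qs S (dfsA pm p S memo).2 (max best (dfsA pm p S memo).1) hinv1
        (le_trans hbest (le_max_left _ _))
    rw [dfsAmax.eq_def]
    simp only
    refine ⟨?_, le_trans h0 (le_max_left _ _), ihinv⟩
    rw [step1, ih1, max_assoc]
termination_by (pvKeysLeft pm S, 1, rest.length)
decreasing_by
  · exact Prod.Lex.right _ (Prod.Lex.left _ _ (by omega))
  · exact Prod.Lex.right _ (Prod.Lex.right _ (by simp))
end

-- the foldl step of compute_depths_alt equals a visitB step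
theorem altStep_eq (pm : List (String × List String)) (memo : PySem.Dict String Int)
    (e : String × List String) :
    (if memo.contains e.1 then memo
     else
       match (pm.lookup e.1).getD [] with
       | [] => memo.insert e.1 0
       | p :: rest =>
         runB pm [(e.1, p :: rest, 0)] (PySem.Set.add PySem.Set.empty e.1) memo) =
    (if memo.contains e.1 then memo else (visitB pm e.1 PySem.Set.empty memo).2) := by
  by_cases hc : memo.contains e.1
  · simp [hc]
  · simp only [hc, Bool.false_eq_true, if_false]
    cases hpre : (pm.lookup e.1).getD [] with
    | nil =>
      simp only [hpre]
      have hv : visitB pm e.1 PySem.Set.empty memo = (0, memo.insert e.1 0) := by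
        rw [visitB.eq_def]
        split
        · rfl
        · rename_i q qs hpre2
          rw [hpre] at hpre2
          cases hpre2
      rw [hv]
    | cons p rest =>
      simp only [hpre]
      have hv : visitB pm e.1 PySem.Set.empty memo =
          ((visitLoop pm (p :: rest) (PySem.Set.add PySem.Set.empty e.1) memo 0).1 + 1,
           (visitLoop pm (p :: rest) (PySem.Set.add PySem.Set.empty e.1) memo 0).2.insert e.1
             ((visitLoop pm (p :: rest) (PySem.Set.add PySem.Set.empty e.1) memo 0).1 + 1)) := by
        rw [visitB.eq_def]
        split
        · rename_i hpre2
          rw [hpre] at hpre2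
          cases hpre2
        · rename_i q' qs' hpre2
          rw [hpre] at hpre2
          injection hpre2 with h1 h2
          subst h1
          subst h2
          rfl
      rw [runB_eq pm e.1 (p :: rest) 0 [] (PySem.Set.add PySem.Set.empty e.1) memo]
      simp only [runBpop]
      rw [hv]

theorem foldl_eq (pm entries : List (String × List String)) (memo : PySem.Dict String Int)
    (hinv : pvInv memo) :
    entries.foldl (fun memo entry => (dfsA pm entry.1 PySem.Set.empty memo).2) memo =
    entries.foldl (fun memo entry =>
      if memo.contains entry.1 then memo
      else (visitB pm entry.1 PySem.Set.empty memo).2) memo := by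
  induction entries generalizing memo with
  | nil => rfl
  | cons e t ih =>
    simp only [List.foldl_cons]
    obtain ⟨heq, -, hinv'⟩ := dfsA_eq_visitB pm e.1 PySem.Set.empty memo hinv
    have hstep : (dfsA pm e.1 PySem.Set.empty memo).2 =
        (if memo.contains e.1 then memo
         else (visitB pm e.1 PySem.Set.empty memo).2) := by
      rw [heq]
      cases hg : memo.get? e.1 with
      | some v =>
        have : memo.contains e.1 = true := by
          rw [PySem.Dict.contains_eq_isSome_get? memo e.1, hg]; rfl
        simp [this]
      | none =>
        have : memo.contains e.1 = false := by
          rw [PySem.Dict.contains_eq_isSome_get? memo e.1, hg]; rfl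
        simp [this, PySem.Set.contains_eq_listContains, PySem.Set.empty]
    rw [hstep] at hinv'
    rw [hstep]
    exact ih _ hinv'

-- ===== VERDICT (by name: the statement is the Claim_ definition above) =====
theorem compute_depths_spec : Claim_equal_compute_depths := by
  intro pm _
  unfold Spec_compute_depths compute_depths compute_depths_alt
  rw [foldl_eq pm pm PySem.Dict.empty
    (by intro v hv; simp [PySem.Dict.values, PySem.Dict.empty] at hv)]
  congr 1
  have hfun : (fun (memo : PySem.Dict String Int) (entry : String × List String) =>
      if memo.contains entry.1 then memo
      else (visitB pm entry.1 PySem.Set.empty memo).2) =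
      (fun (memo : PySem.Dict String Int) (entry : String × List String) =>
        if memo.contains entry.1 then memo
        else
          match (pm.lookup entry.1).getD [] with
          | [] => memo.insert entry.1 0
          | p :: rest =>
            runB pm [(entry.1, p :: rest, 0)] (PySem.Set.add PySem.Set.empty entry.1) memo) := by
    funext memo e
    exact (altStep_eq pm memo e).symm
  rw [hfun]
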